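-- pv_equiv track=rewrite | github.com/xi-j/ListenChatRemix | data/datasets/prompt_templates.py | build_style_description_from
-- ===== SOURCE A (Python) =====
-- def build_style_description_from(style, keys):
--     description = 'the'
--     if 'emotion' in keys:
--         if style['emotion'] != 'neutral':
--             emotion = style['emotion']
--         else:
--             emotion = 'neutral-emotion'
--         description += ' '
--         description += emotion
--     if 'gender' in keys:
--         description += ' '
--         description += 'female' if style['gender'] == 'F' else 'male'
--
--     description += ' speaker'
--
--     if 'pitch' in keys or 'tempo' in keys or 'energy' in keys:
--         description += ' characterized by'
--     else:
--         return description
--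
--     keys = [key for key in ['pitch', 'tempo', 'energy'] if key in keys]
--
--     for i, key in enumerate(keys):
--         if i == 0:
--             description += ' '
--         elif i == len(keys) - 1:
--             if len(keys) > 2:
--                 description += ', and '
--             else:
--                 description += ' and '
--         else:
--             description += ', '
--
--         description += style[key]
--         description += ' '
--         description += key
--
--     return description
-- ===== SOURCE B (Python) =====
-- def build_style_description_from(style, keys):
--     desc = 'the'
--     if 'emotion' in keys:
--         desc += ' ' + (style['emotion'] if style['emotion'] != 'neutral' else 'neutral-emotion')
--     if 'gender' in keys:
--         desc += ' ' + ('female' if style['gender'] == 'F' else 'male')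
--     desc += ' speaker'
--
--     parts = [style[k] + ' ' + k for k in ('pitch', 'tempo', 'energy') if k in keys]
--     if not parts:
--         return desc
--     desc += ' characterized by'
--     if len(parts) == 1:
--         return desc + ' ' + parts[0]
--     if len(parts) == 2:
--         return desc + ' ' + parts[0] + ' and ' + parts[1]
--     return desc + ' ' + parts[0] + ', ' + parts[1] + ', and ' + parts[2]
-- ===== Notes on version B (the rewrite author's own statement) =====
-- stated objective: simpler
-- what changed: Replaces A's enumerate loop with per-index separator branching by building the filtered list of 'value key' parts once and assembling the tail by a direct case split on its length (0/1/2/3).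
import Mathlib
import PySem

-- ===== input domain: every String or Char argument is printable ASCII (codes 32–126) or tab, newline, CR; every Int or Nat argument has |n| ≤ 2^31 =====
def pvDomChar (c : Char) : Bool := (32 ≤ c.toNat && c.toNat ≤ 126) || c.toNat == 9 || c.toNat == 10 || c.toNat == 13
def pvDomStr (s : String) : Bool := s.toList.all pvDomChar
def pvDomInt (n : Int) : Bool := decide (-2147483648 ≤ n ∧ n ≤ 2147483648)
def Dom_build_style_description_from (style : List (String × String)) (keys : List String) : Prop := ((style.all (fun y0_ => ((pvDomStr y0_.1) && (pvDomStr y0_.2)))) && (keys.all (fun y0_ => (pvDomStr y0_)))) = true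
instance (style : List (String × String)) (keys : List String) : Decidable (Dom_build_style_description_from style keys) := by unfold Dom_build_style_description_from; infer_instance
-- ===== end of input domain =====

-- B replaces A's index-branching enumerate loop by a filtered parts list and a case split
-- on its length (objective: simpler decomposition; same cost).

-- style[k]: first-match association-list lookup; Pre_ guarantees the key is present
-- wherever it is consulted (KeyError excluded), so the default is never read.
def pvStyleGet (style : List (String × String)) (k : String) : String :=
  (List.lookup k style).getD ""

-- ===== PORT A =====
def build_style_description_from (style : List (String × String)) (keys : List String) : String :=
  let d0 := "the"
  let d1 := if keys.contains "emotion" then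
      let emotion := if pvStyleGet style "emotion" ≠ "neutral" then pvStyleGet style "emotion"
        else "neutral-emotion"
      d0 ++ " " ++ emotion
    else d0
  let d2 := if keys.contains "gender" then
      d1 ++ " " ++ (if pvStyleGet style "gender" = "F" then "female" else "male")
    else d1
  let d3 := d2 ++ " speaker"
  if keys.contains "pitch" || keys.contains "tempo" || keys.contains "energy" then
    let d4 := d3 ++ " characterized by"
    let ks := ["pitch", "tempo", "energy"].filter (fun k => keys.contains k)
    (PySem.List.enumerate ks 0).foldl (fun desc p =>
      let desc := if p.1 = 0 then desc ++ " "
        else if p.1 = PySem.List.len ks - 1 then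
          (if PySem.List.len ks > 2 then desc ++ ", and " else desc ++ " and ")
        else desc ++ ", "
      desc ++ pvStyleGet style p.2 ++ " " ++ p.2) d4
  else d3

-- ===== PORT B =====
def build_style_description_from_alt (style : List (String × String)) (keys : List String) : String :=
  let desc0 := "the"
  let desc1 := if keys.contains "emotion" then
      desc0 ++ " " ++ (if pvStyleGet style "emotion" ≠ "neutral" then pvStyleGet style "emotion"
        else "neutral-emotion")
    else desc0
  let desc2 := if keys.contains "gender" then
      desc1 ++ " " ++ (if pvStyleGet style "gender" = "F" then "female" else "male")
    else desc1
  let desc := desc2 ++ " speaker"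
  let parts := (["pitch", "tempo", "energy"].filter (fun k => keys.contains k)).map
      (fun k => pvStyleGet style k ++ " " ++ k)
  match parts with
  | [] => desc
  | [p] => desc ++ " characterized by" ++ " " ++ p
  | [p, q] => desc ++ " characterized by" ++ " " ++ p ++ " and " ++ q
  | p :: q :: r :: _ => desc ++ " characterized by" ++ " " ++ p ++ ", " ++ q ++ ", and " ++ r

-- ===== PRECONDITION & SPEC =====
-- Pre_ excludes exactly the inputs where Python A raises KeyError: a consulted key
-- ('emotion'/'gender' when listed, or a listed one of 'pitch'/'tempo'/'energy') missing from style.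
def Pre_build_style_description_from (style : List (String × String)) (keys : List String) : Prop :=
  (keys.contains "emotion" = true → (List.lookup "emotion" style).isSome = true) ∧
  (keys.contains "gender" = true → (List.lookup "gender" style).isSome = true) ∧
  (keys.contains "pitch" = true → (List.lookup "pitch" style).isSome = true) ∧
  (keys.contains "tempo" = true → (List.lookup "tempo" style).isSome = true) ∧
  (keys.contains "energy" = true → (List.lookup "energy" style).isSome = true)
instance (style : List (String × String)) (keys : List String) : Decidable (Pre_build_style_description_from style keys) := by unfold Pre_build_style_description_from; infer_instance

def pvWitness_build_style_description_from : (List (String × String)) × List String :=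
  ([("emotion", "happy"), ("pitch", "high"), ("tempo", "slow")], ["emotion", "pitch", "tempo"])

def Spec_build_style_description_from (style : List (String × String)) (keys : List String) (out : String) : Prop := out = build_style_description_from_alt style keys
instance (style : List (String × String)) (keys : List String) (out : String) : Decidable (Spec_build_style_description_from style keys out) := by unfold Spec_build_style_description_from; infer_instance

-- ===== CLAIM (what is proved, stated in full; the proofs are below) =====
def Claim_equal_build_style_description_from : Prop := ∀ (style : List (String × String)) (keys : List String), Dom_build_style_description_from style keys → Pre_build_style_description_from style keys → Spec_build_style_description_from style keys (build_style_description_from style keys)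

-- ===== LEMMAS AND PROOFS =====

-- ===== VERDICT (by name: the statement is the Claim_ definition above) =====
theorem build_style_description_from_spec : Claim_equal_build_style_description_from := by
  intro style keys _ _
  unfold Spec_build_style_description_from
  unfold build_style_description_from build_style_description_from_alt
  by_cases hp : "pitch" ∈ keys <;> by_cases ht : "tempo" ∈ keys <;>
    by_cases he : "energy" ∈ keys <;>
      simp [hp, ht, he, List.filter, PySem.List.enumerate, PySem.List.len,
        String.append_assoc]
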